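-- pv_equiv track=rewrite | github.com/LittleDijkstraZ/AIMO | outputs/all_captured_20240621-165025_T=1367_12_2048_1|0.9|1|0.9_28.97/utils.py | naive_parse
-- ===== SOURCE A (Python) =====
-- def naive_parse(answer):
--     '''
--     get the first consecutive numbers
--     '''
--     out = []
--     start = False
--     end = False
--     answer = answer.split('answer')[-1] # limit the number to be obtained
--     if len(answer)>20:
--         return ''
--     for l in reversed(list(answer)):
--         if l in '0123456789' and not end:
--             start = True
--             out.append(l)
--         else:
--             if start:
--                 end = True
--
--     out = reversed(out)
--     return ''.join(out)
-- ===== SOURCE B (Python) =====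
-- def naive_parse(answer):
--     '''
--     get the first consecutive numbers
--     '''
--     answer = answer.split('answer')[-1] # limit the number to be obtained
--     if len(answer) > 20:
--         return ''
--     last = ''
--     cur = ''
--     for ch in answer:
--         if '0' <= ch <= '9':
--             cur += ch
--         else:
--             if cur:
--                 last = cur
--             cur = ''
--     return cur if cur else last
-- ===== Notes on version B (the rewrite author's own statement) =====
-- stated objective: simpler
-- what changed: Replaces A's right-to-left scan with start/end flags (collecting digits in reverse and reversing back) by a single left-to-right scan that keeps the current digit run and the last completed run and returns the current run if nonempty, else the last one.
import Mathlib
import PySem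

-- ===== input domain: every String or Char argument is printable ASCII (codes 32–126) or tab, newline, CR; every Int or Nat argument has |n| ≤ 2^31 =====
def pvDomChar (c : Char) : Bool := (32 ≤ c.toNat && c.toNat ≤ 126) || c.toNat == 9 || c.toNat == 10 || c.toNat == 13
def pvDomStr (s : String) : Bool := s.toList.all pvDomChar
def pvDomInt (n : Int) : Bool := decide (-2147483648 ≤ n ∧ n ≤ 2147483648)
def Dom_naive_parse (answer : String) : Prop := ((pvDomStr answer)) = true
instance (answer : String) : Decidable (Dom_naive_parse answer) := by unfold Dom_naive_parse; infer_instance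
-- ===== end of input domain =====

-- B replaces A's right-to-left scan with flags by a single left-to-right scan keeping the
-- current and the last completed digit run (objective: simpler, same cost).

-- ===== PORT A =====
-- loop body of A: state (out, start, end); 'l in "0123456789"' is char membership
def pvStepA (st : List Char × Bool × Bool) (l : Char) : List Char × Bool × Bool :=
  if ("0123456789".toList.contains l && !st.2.2) then (st.1 ++ [l], true, st.2.2)
  else (st.1, st.2.1, st.2.1 || st.2.2)

def naive_parse (answer : String) : String :=
  -- answer.split('answer')[-1]: split? is some (sep ≠ ""), the list is never empty so [-1] succeeds
  let a := (PySem.List.pyGet? ((PySem.Str.split? answer "answer").getD []) (-1)).getD ""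
  if 20 < PySem.Str.len a then ""
  else
    let st := a.toList.reverse.foldl pvStepA ([], false, false)
    -- ''.join(reversed(out)) on a list of single chars = the reversed char list as a string
    String.ofList st.1.reverse

-- ===== PORT B =====
-- loop body of B: state (last, cur)
def pvStepB (st : List Char × List Char) (ch : Char) : List Char × List Char :=
  if (decide ('0' ≤ ch) && decide (ch ≤ '9')) then (st.1, st.2 ++ [ch])
  else if st.2 ≠ [] then (st.2, []) else (st.1, [])

def naive_parse_alt (answer : String) : String :=
  let a := (PySem.List.pyGet? ((PySem.Str.split? answer "answer").getD []) (-1)).getD ""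
  if 20 < PySem.Str.len a then ""
  else
    let st := a.toList.foldl pvStepB ([], [])
    String.ofList (if st.2 ≠ [] then st.2 else st.1)

-- ===== PRECONDITION & SPEC =====
def Spec_naive_parse (answer : String) (out : String) : Prop := out = naive_parse_alt answer
instance (answer : String) (out : String) : Decidable (Spec_naive_parse answer out) := by unfold Spec_naive_parse; infer_instance

-- ===== CLAIM (what is proved, stated in full; the proofs are below) =====
def Claim_equal_naive_parse : Prop := ∀ (answer : String), Dom_naive_parse answer → Spec_naive_parse answer (naive_parse answer)

-- ===== LEMMAS AND PROOFS =====

-- A's scan written as a foldr (foldl over the reversed list)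
def pvRunA (cs : List Char) : List Char × Bool × Bool :=
  cs.foldr (fun l st => pvStepA st l) ([], false, false)

-- B's final value from an arbitrary starting state
def pvFinB (cs : List Char) (last cur : List Char) : List Char :=
  let st := cs.foldl pvStepB (last, cur)
  if st.2 ≠ [] then st.2 else st.1

lemma pv_mem_digits (c : Char) :
    ("0123456789".toList.contains c) = (decide ('0' ≤ c) && decide (c ≤ '9')) := by
  have h : "0123456789".toList = ['0','1','2','3','4','5','6','7','8','9'] := by decide
  rw [h, Bool.eq_iff_iff]
  simp only [List.contains_cons, List.contains_nil, Bool.or_false, Bool.or_eq_true, beq_iff_eq,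
    Bool.and_eq_true, decide_eq_true_eq, Char.le_def, UInt32.le_iff_toNat_le, Char.ext_iff,
    UInt32.ext_iff]
  have h0 : ('0':Char).val.toNat = 48 := rfl
  have h1 : ('1':Char).val.toNat = 49 := rfl
  have h2 : ('2':Char).val.toNat = 50 := rfl
  have h3 : ('3':Char).val.toNat = 51 := rfl
  have h4 : ('4':Char).val.toNat = 52 := rfl
  have h5 : ('5':Char).val.toNat = 53 := rfl
  have h6 : ('6':Char).val.toNat = 54 := rfl
  have h7 : ('7':Char).val.toNat = 55 := rfl
  have h8 : ('8':Char).val.toNat = 56 := rfl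
  have h9 : ('9':Char).val.toNat = 57 := rfl
  omega

-- invariant: A's 'start' flag is exactly 'out is nonempty'
lemma pv_runA_start (cs : List Char) : (pvRunA cs).2.1 = decide ((pvRunA cs).1 ≠ []) := by
  induction cs with
  | nil => rfl
  | cons c cs ih =>
    show (pvStepA (pvRunA cs) c).2.1 = decide ((pvStepA (pvRunA cs) c).1 ≠ [])
    unfold pvStepA
    split_ifs with hd
    · simp
    · simpa using ih

lemma pv_finB_eq (cs : List Char) : ∀ last cur : List Char,
    pvFinB cs last cur =
      (if (pvRunA cs).2.2 then (pvRunA cs).1.reverse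
       else if (pvRunA cs).1 ≠ [] ∨ cur ≠ [] then cur ++ (pvRunA cs).1.reverse
       else last) := by
  induction cs with
  | nil =>
    intro last cur
    by_cases hc : cur = [] <;> simp [pvFinB, pvRunA, hc]
  | cons c cs ih =>
    intro last cur
    have hstart := pv_runA_start cs
    have hstep : pvRunA (c :: cs) = pvStepA (pvRunA cs) c := rfl
    have hfin : ∀ l u, pvFinB (c :: cs) l u = pvFinB cs (pvStepB (l, u) c).1 (pvStepB (l, u) c).2 := by
      intro l u; rfl
    rcases hA : pvRunA cs with ⟨out, s, e⟩
    rw [hA] at hstart ih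
    simp only at hstart
    by_cases hd : (decide ('0' ≤ c) && decide (c ≤ '9')) = true
    · -- digit character
      have hsB : pvStepB (last, cur) c = (last, cur ++ [c]) := by
        unfold pvStepB; rw [if_pos hd]
      by_cases he : e = true
      · subst he
        have hsA : pvStepA (out, s, true) c = (out, s, true) := by
          unfold pvStepA; rw [pv_mem_digits, hd]; simp
        rw [hfin, hstep, hA, hsA, hsB]
        simp only [ih]
        simp
      · replace he : e = false := by simpa using he
        subst he
        have hsA : pvStepA (out, s, false) c = (out ++ [c], true, false) := by
          unfold pvStepA; rw [pv_mem_digits, hd]; simp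
        rw [hfin, hstep, hA, hsA, hsB]
        simp only [ih]
        simp [List.append_assoc]
    · -- non-digit character
      replace hd : (decide ('0' ≤ c) && decide (c ≤ '9')) = false := by simpa using hd
      have hsA : pvStepA (out, s, e) c = (out, s, s || e) := by
        unfold pvStepA; rw [pv_mem_digits, hd]; simp
      have hsB : pvStepB (last, cur) c = (if cur ≠ [] then cur else last, []) := by
        unfold pvStepB; rw [hd]; by_cases hcur : cur = [] <;> simp [hcur]
      rw [hfin, hstep, hA, hsA, hsB]
      simp only [ih]
      rw [hstart]
      by_cases he : e = true
      · simp [he]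
      · replace he : e = false := by simpa using he
        subst he
        by_cases hout : out = []
        · by_cases hcur : cur = [] <;> simp [hout, hcur]
        · simp [hout]

lemma pv_finB_run (cs : List Char) : pvFinB cs [] [] = (pvRunA cs).1.reverse := by
  rw [pv_finB_eq cs [] []]
  by_cases he : (pvRunA cs).2.2 = true
  · simp [he]
  · by_cases hout : (pvRunA cs).1 = []
    · simp [he, hout]
    · simp [he, hout]

-- ===== VERDICT (by name: the statement is the Claim_ definition above) =====
theorem naive_parse_spec : Claim_equal_naive_parse := by
  intro answer _
  unfold Spec_naive_parse naive_parse naive_parse_alt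
  simp only []
  by_cases h : 20 < PySem.Str.len ((PySem.List.pyGet? ((PySem.Str.split? answer "answer").getD []) (-1)).getD "")
  · rw [if_pos h, if_pos h]
  · rw [if_neg h, if_neg h]
    rw [List.foldl_reverse]
    congr 1
    exact (pv_finB_run _).symm
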